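-- pv_equiv track=rewrite | github.com/veev-code/LibSpellDB | Tools/validate_spells.py | check_duplicate_spell_ids
-- ===== SOURCE A (Python) =====
-- def check_duplicate_spell_ids(all_spell_ids):
--     """Rule 18: Check for duplicate spellIDs across all files.
--
--     Allows duplicate spellIDs when they have different classes (cross-class spells
--     like Mace Stun Effect shared between Warrior and Rogue).
--     """
--     errors = []
--     seen = {}
--     for spell_id, name, spell_class, filename, line_num in all_spell_ids:
--         if spell_id in seen:
--             prev_name, prev_class, prev_file, prev_line = seen[spell_id]
--             if spell_class == prev_class:
--                 errors.append(
--                     f"DUPLICATE SPELLID: [{spell_id}] {name} ({filename}:{line_num}) "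
--                     f"duplicates [{spell_id}] {prev_name} ({prev_file}:{prev_line}) — same class '{spell_class}'"
--                 )
--         else:
--             seen[spell_id] = (name, spell_class, filename, line_num)
--     return errors
-- ===== SOURCE B (Python) =====
-- def check_duplicate_spell_ids(all_spell_ids):
--     """Rule 18, group-by re-implementation: index entries by spell_id (with their
--     positions), then for each group compare every later entry against the group's
--     first entry; restore input order by sorting the collected (position, message)
--     pairs."""
--     groups = {}
--     for idx, entry in enumerate(all_spell_ids):
--         groups.setdefault(entry[0], []).append((idx, entry))
--     found = []
--     for entries in groups.values():
--         _, ref = entries[0]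
--         _, ref_name, ref_class, ref_file, ref_line = ref
--         for idx, (spell_id, name, spell_class, filename, line_num) in entries[1:]:
--             if spell_class == ref_class:
--                 found.append((
--                     idx,
--                     f"DUPLICATE SPELLID: [{spell_id}] {name} ({filename}:{line_num}) "
--                     f"duplicates [{spell_id}] {ref_name} ({ref_file}:{ref_line}) — same class '{spell_class}'"
--                 ))
--     found.sort(key=lambda p: p[0])
--     return [msg for _, msg in found]
-- ===== Notes on version B (the rewrite author's own statement) =====
-- stated objective: alternative
-- what changed: Replaces A's single stateful pass with a running seen-dict by a group-by pipeline: first pass builds an index spell_id -> list of (position, entry), second pass scans each group against its first entry, and the collected (position, message) pairs are sorted to restore input order.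
import Mathlib
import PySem

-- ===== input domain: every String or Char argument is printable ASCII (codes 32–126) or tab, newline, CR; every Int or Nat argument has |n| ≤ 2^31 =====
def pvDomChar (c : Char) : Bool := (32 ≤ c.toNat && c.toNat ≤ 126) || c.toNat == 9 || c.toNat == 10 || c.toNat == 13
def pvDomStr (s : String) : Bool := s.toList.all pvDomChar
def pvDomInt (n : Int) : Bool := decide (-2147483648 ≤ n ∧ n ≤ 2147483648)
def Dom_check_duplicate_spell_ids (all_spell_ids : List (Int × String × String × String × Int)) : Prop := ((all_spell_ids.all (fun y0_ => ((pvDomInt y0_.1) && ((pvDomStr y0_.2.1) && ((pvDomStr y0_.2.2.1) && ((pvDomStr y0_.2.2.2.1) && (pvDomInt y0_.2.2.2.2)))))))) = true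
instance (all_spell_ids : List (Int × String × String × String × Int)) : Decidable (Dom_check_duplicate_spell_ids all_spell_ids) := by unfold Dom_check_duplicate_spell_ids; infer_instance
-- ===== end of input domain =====

-- B replaces A's single stateful pass (running seen-dict) by a group-by pipeline:
-- index entries by spell_id with their positions, scan each group against its first
-- entry, and sort the collected (position, message) pairs to restore input order
-- (objective: alternative algorithm, same return value).

-- shared formatting helper (the f-string, identical in both Pythons)
def dupMsg (sid : Int) (name fn : String) (ln : Int) (pname pfn : String) (pln : Int) (cls : String) : String :=
  "DUPLICATE SPELLID: [" ++ PySem.Int.toStr sid ++ "] " ++ name ++ " (" ++ fn ++ ":"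
    ++ PySem.Int.toStr ln ++ ") duplicates [" ++ PySem.Int.toStr sid ++ "] " ++ pname
    ++ " (" ++ pfn ++ ":" ++ PySem.Int.toStr pln ++ ") — same class '" ++ cls ++ "'"

-- ===== PORT A =====
-- literal port: fold over entries carrying (errors, seen); 'spell_id in seen' / 'seen[spell_id]' = Dict.get?
def check_duplicate_spell_ids (all_spell_ids : List (Int × String × String × String × Int)) : List String :=
  (all_spell_ids.foldl
    (fun (st : List String × PySem.Dict Int (String × String × String × Int)) e =>
      let (errors, seen) := st
      let (sid, name, cls, fn, ln) := e
      match seen.get? sid with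
      | some (pname, pcls, pfn, pln) =>
          if cls == pcls then (errors ++ [dupMsg sid name fn ln pname pfn pln cls], seen)
          else (errors, seen)
      | none => (errors, seen.insert sid (name, cls, fn, ln)))
    ([], PySem.Dict.empty)).1

-- ===== PORT B =====
-- literal port of Source B: pass 1 groups.setdefault(sid,[]).append((idx,entry)) = Dict.modify sid [] (· ++ [(idx,entry)]);
-- pass 2 folds over groups.values(); entries[0]/entries[1:] = the head/tail match (a group is never empty in Python,
-- so the [] branch is unreachable); found.sort(key=…) = PySem.List.sorted; the final comprehension = map.
def check_duplicate_spell_ids_alt (all_spell_ids : List (Int × String × String × String × Int)) : List String :=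
  let groups : PySem.Dict Int (List (Int × (Int × String × String × String × Int))) :=
    (PySem.List.enumerate all_spell_ids 0).foldl
      (fun d ie => d.modify ie.2.1 [] (fun v => v ++ [ie])) PySem.Dict.empty
  let found : List (Int × String) :=
    groups.values.foldl
      (fun acc entries =>
        match entries with
        | [] => acc
        | (_, ref) :: rest =>
            acc ++ rest.foldl
              (fun (a : List (Int × String)) ie =>
                if ie.2.2.2.1 == ref.2.2.1 then
                  a ++ [(ie.1, dupMsg ie.2.1 ie.2.2.1 ie.2.2.2.2.1 ie.2.2.2.2.2 ref.2.1 ref.2.2.2.1 ref.2.2.2.2 ie.2.2.2.1)]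
                else a) [])
      []
  (PySem.List.sorted found (fun p => p.1)).map (fun p => p.2)

-- ===== PRECONDITION & SPEC =====
def Spec_check_duplicate_spell_ids (all_spell_ids : List (Int × String × String × String × Int)) (out : List String) : Prop := out = check_duplicate_spell_ids_alt all_spell_ids
instance (all_spell_ids : List (Int × String × String × String × Int)) (out : List String) : Decidable (Spec_check_duplicate_spell_ids all_spell_ids out) := by unfold Spec_check_duplicate_spell_ids; infer_instance

-- ===== CLAIM (what is proved, stated in full; the proofs are below) =====
def Claim_equal_check_duplicate_spell_ids : Prop := ∀ (all_spell_ids : List (Int × String × String × String × Int)), Dom_check_duplicate_spell_ids all_spell_ids → Spec_check_duplicate_spell_ids all_spell_ids (check_duplicate_spell_ids all_spell_ids)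

-- ===== LEMMAS AND PROOFS =====

-- the error pair an entry e at position i contributes against its reference p
def pairIf (p e : Int × String × String × String × Int) (i : Int) : List (Int × String) :=
  if e.2.2.1 == p.2.2.1 then
    [(i, dupMsg e.1 e.2.1 e.2.2.2.1 e.2.2.2.2 p.2.1 p.2.2.2.1 p.2.2.2.2 e.2.2.1)] else []

-- canonical (position, message) list, in input order
def P (pre rest : List (Int × String × String × String × Int)) : List (Int × String) :=
  match rest with
  | [] => []
  | e :: rs =>
      (match pre.find? (fun p => p.1 == e.1) with
       | some p => pairIf p e (pre.length : Int)
       | none => []) ++ P (pre ++ [e]) rs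

-- A's messages, recursively (prefix processed so far, rest to go)
def dupGo (pre rest : List (Int × String × String × String × Int)) : List String :=
  match rest with
  | [] => []
  | e :: rs =>
      (match pre.find? (fun p => p.1 == e.1) with
       | some p => if e.2.2.1 == p.2.2.1 then
            [dupMsg e.1 e.2.1 e.2.2.2.1 e.2.2.2.2 p.2.1 p.2.2.2.1 p.2.2.2.2 e.2.2.1]
          else []
       | none => []) ++ dupGo (pre ++ [e]) rs

-- what pass 2 of B emits per group
def gEmit (entries : List (Int × (Int × String × String × String × Int))) : List (Int × String) :=
  match entries with
  | [] => []
  | (_, ref) :: rest =>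
      rest.foldl
        (fun (a : List (Int × String)) ie =>
          if ie.2.2.2.1 == ref.2.2.1 then
            a ++ [(ie.1, dupMsg ie.2.1 ie.2.2.1 ie.2.2.2.2.1 ie.2.2.2.2.2 ref.2.1 ref.2.2.2.1 ref.2.2.2.2 ie.2.2.2.1)]
          else a) []

-- the group of a spell id: its enumerated entries, in order
def grp (xs : List (Int × String × String × String × Int)) (k : Int) :
    List (Int × (Int × String × String × String × Int)) :=
  (PySem.List.enumerate xs 0).filter (fun ie => ie.2.1 == k)

theorem gEmit_cons (e0 : Int × (Int × String × String × String × Int))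
    (rest : List (Int × (Int × String × String × String × Int))) :
    gEmit (e0 :: rest) =
      (rest.filter (fun ie => ie.2.2.2.1 == e0.2.2.2.1)).map
        (fun ie => (ie.1, dupMsg ie.2.1 ie.2.2.1 ie.2.2.2.2.1 ie.2.2.2.2.2 e0.2.2.1 e0.2.2.2.2.1 e0.2.2.2.2.2 ie.2.2.2.1)) := by
  obtain ⟨i0, ref⟩ := e0
  simp only [gEmit]
  rw [PySem.List.foldl_append_if]
  simp

theorem a_go (rest : List (Int × String × String × String × Int)) :
    ∀ (pre : List (Int × String × String × String × Int)) (errors : List String)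
      (seen : PySem.Dict Int (String × String × String × Int)),
      (∀ sid, seen.get? sid = (pre.find? (fun p => p.1 == sid)).map (·.2)) →
      (rest.foldl
        (fun (st : List String × PySem.Dict Int (String × String × String × Int)) e =>
          let (errors, seen) := st
          let (sid, name, cls, fn, ln) := e
          match seen.get? sid with
          | some (pname, pcls, pfn, pln) =>
              if cls == pcls then (errors ++ [dupMsg sid name fn ln pname pfn pln cls], seen)
              else (errors, seen)
          | none => (errors, seen.insert sid (name, cls, fn, ln)))
        (errors, seen)).1 = errors ++ dupGo pre rest := by
  induction rest with
  | nil => intro pre errors seen _; simp [dupGo]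
  | cons e rs ih =>
    intro pre errors seen hInv
    have hnew : ∀ (seen' : PySem.Dict Int (String × String × String × Int)),
        (∀ sid, seen'.get? sid = ((pre.find? (fun p => p.1 == sid)).or
            (if e.1 == sid then some e else none)).map (·.2)) →
        (∀ sid, seen'.get? sid = ((pre ++ [e]).find? (fun p => p.1 == sid)).map (·.2)) := by
      intro seen' h sid
      rw [List.find?_append]
      have : [e].find? (fun p => p.1 == sid) = if e.1 == sid then some e else none := by
        cases h' : (e.1 == sid) <;> simp [List.find?, h']
      rw [this]; exact h sid
    have h := hInv e.1
    obtain ⟨sid, name, cls, fn, ln⟩ := e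
    simp only [List.foldl_cons]
    cases hf : pre.find? (fun p => p.1 == sid) with
    | none =>
      rw [hf] at h; simp only [Option.map_none] at h
      simp only [h, dupGo, hf, List.nil_append]
      exact ih (pre ++ [(sid, name, cls, fn, ln)]) errors _ (by
        apply hnew
        intro sid'
        by_cases hs : sid' = sid
        · subst hs
          rw [PySem.Dict.get?_insert_self, hf]
          simp
        · rw [PySem.Dict.get?_insert_of_ne _ _ hs, hInv sid']
          have : ((sid : Int) == sid') = false := by
            simp [Ne.symm hs]
          simp [this])
    | some p =>
      rw [hf] at h; simp only [Option.map_some] at h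
      have hInv' : ∀ sid', seen.get? sid' = ((pre ++ [(sid, name, cls, fn, ln)]).find? (fun q => q.1 == sid')).map (·.2) := by
        apply hnew
        intro sid'
        by_cases hs : sid' = sid
        · subst hs; rw [hf]; simpa using h
        · have : ((sid : Int) == sid') = false := by simp [Ne.symm hs]
          simp [this, hInv sid']
      obtain ⟨psid, pname, pcls, pfn, pln⟩ := p
      simp only at h
      rw [h]
      simp only [dupGo, hf]
      by_cases hc : cls = pcls
      · simp only [hc, beq_self_eq_true, if_true]
        rw [ih (pre ++ [(sid, name, cls, fn, ln)]) _ seen hInv']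
        simp [hc]
      · have : (cls == pcls) = false := by simp [hc]
        simp only [this, Bool.false_eq_true, if_false]
        rw [ih (pre ++ [(sid, name, cls, fn, ln)]) errors seen hInv']
        simp

theorem dupGo_eq_P_map (rest : List (Int × String × String × String × Int)) :
    ∀ pre, dupGo pre rest = (P pre rest).map (fun q => q.2) := by
  induction rest with
  | nil => intro pre; simp [dupGo, P]
  | cons e rs ih =>
    intro pre
    simp only [dupGo, P, List.map_append, ih]
    congr 1
    cases hf : pre.find? (fun p => p.1 == e.1) with
    | none => simp
    | some p => by_cases hc : e.2.2.1 = p.2.2.1 <;> simp [pairIf, hc]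

theorem P_append_singleton (ys : List (Int × String × String × String × Int))
    (e : Int × String × String × String × Int) :
    ∀ pre, P pre (ys ++ [e]) = P pre ys ++
      (match (pre ++ ys).find? (fun p => p.1 == e.1) with
       | some p => pairIf p e ((pre ++ ys).length : Int)
       | none => []) := by
  induction ys with
  | nil => intro pre; simp [P]
  | cons y ys ih =>
    intro pre
    simp only [List.cons_append, P, ih (pre ++ [y]), List.append_assoc]
    simp

theorem P_fst_bounds (rest : List (Int × String × String × String × Int)) :
    ∀ pre, (∀ q ∈ P pre rest, (pre.length : Int) ≤ q.1) ∧
      (P pre rest).Pairwise (fun a b => a.1 < b.1) := by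
  induction rest with
  | nil => intro pre; simp [P]
  | cons e rs ih =>
    intro pre
    obtain ⟨hlb, hpw⟩ := ih (pre ++ [e])
    have hlen : (pre ++ [e]).length = pre.length + 1 := by simp
    have hhead : ∀ q ∈ (match pre.find? (fun p => p.1 == e.1) with
       | some p => pairIf p e (pre.length : Int)
       | none => ([] : List (Int × String))), q.1 = (pre.length : Int) := by
      cases hf : pre.find? (fun p => p.1 == e.1) with
      | none => simp
      | some p =>
        intro q hq
        simp only [pairIf] at hq
        split at hq <;> simp_all
    constructor
    · intro q hq
      simp only [P, List.mem_append] at hq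
      rcases hq with h | h
      · exact le_of_eq (hhead q h).symm
      · have := hlb q h; rw [hlen] at this; push_cast at this; omega
    · rw [P, List.pairwise_append]
      refine ⟨?_, hpw, ?_⟩
      · cases hf : pre.find? (fun p => p.1 == e.1) with
        | none => simp
        | some p => simp only [pairIf]; split <;> simp
      · intro a ha b hb
        have h1 := hhead a ha
        have h2 := hlb b hb
        rw [hlen] at h2; push_cast at h2; omega

theorem filter_enum_map_snd {α : Type} (q : α → Bool) (xs : List α) :
    ∀ s : Int, ((PySem.List.enumerate xs s).filter (fun ie => q ie.2)).map (fun ie => ie.2)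
      = xs.filter q := by
  induction xs with
  | nil => intro s; simp [PySem.List.enumerate_nil]
  | cons x xs ih =>
    intro s
    rw [PySem.List.enumerate_cons]
    cases hq : q x <;> simp [hq, ih]

theorem values_eq_map_getD {κ ν : Type} [BEq κ] [LawfulBEq κ] (items : List (κ × ν)) (dflt : ν) :
    (items.map (fun p => p.1)).Nodup →
    (PySem.Dict.mk items).values =
      (items.map (fun p => p.1)).map (fun k => (PySem.Dict.mk items).getD k dflt) := by
  induction items with
  | nil => intro _; simp [PySem.Dict.values]
  | cons kv rest ih =>
    intro hnd
    obtain ⟨k, v⟩ := kv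
    simp only [List.map_cons, List.nodup_cons] at hnd
    obtain ⟨hk, hnd'⟩ := hnd
    have hvals : (PySem.Dict.mk ((k, v) :: rest)).values = v :: (PySem.Dict.mk rest).values := by
      simp [PySem.Dict.values]
    have hself : (PySem.Dict.mk ((k, v) :: rest)).getD k dflt = v := by
      simp [PySem.Dict.getD, PySem.Dict.get?_mk_cons]
    have hne : ∀ k' ∈ rest.map (fun p => p.1),
        (PySem.Dict.mk ((k, v) :: rest)).getD k' dflt = (PySem.Dict.mk rest).getD k' dflt := by
      intro k' hk'
      have : (k == k') = false := by
        by_contra h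
        rw [Bool.not_eq_false, beq_iff_eq] at h
        exact hk (h ▸ hk')
      simp [PySem.Dict.getD, PySem.Dict.get?_mk_cons, this]
    rw [hvals, ih hnd']
    simp only [List.map_cons]
    rw [List.map_congr_left hne]
    simp [hself]

theorem values_eq_map_getD' {κ ν : Type} [BEq κ] [LawfulBEq κ] (d : PySem.Dict κ ν) (dflt : ν)
    (h : d.keys.Nodup) : d.values = d.keys.map (fun k => d.getD k dflt) := by
  obtain ⟨items⟩ := d
  have h' : (items.map (fun p => p.1)).Nodup := by simpa [PySem.Dict.keys] using h
  simpa [PySem.Dict.keys] using values_eq_map_getD items dflt h'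

theorem perm_flatMap_update {α β : Type} (s : List α) (f f' : α → List β) (k : α) (d : List β)
    (hn : s.Nodup) (hk : k ∈ s) (hagree : ∀ x ∈ s, x ≠ k → f' x = f x)
    (hf'k : f' k = f k ++ d) : (s.flatMap f').Perm (s.flatMap f ++ d) := by
  obtain ⟨s1, s2, rfl⟩ := List.append_of_mem hk
  rw [List.nodup_append] at hn
  obtain ⟨h1, h2, h3⟩ := hn
  have hk1 : k ∉ s1 := fun h => h3 k h k (by simp) rfl
  have e1 : s1.flatMap f' = s1.flatMap f :=
    List.flatMap_congr (fun x hx => hagree x (by simp [hx]) (fun he => hk1 (he ▸ hx)))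
  have hk2 : k ∉ s2 := by rw [List.nodup_cons] at h2; exact h2.1
  have e2 : s2.flatMap f' = s2.flatMap f :=
    List.flatMap_congr (fun x hx => hagree x (by simp [hx]) (fun he => hk2 (he ▸ hx)))
  simp only [List.flatMap_append, List.flatMap_cons, e1, e2, hf'k]
  have hL : s1.flatMap f ++ ((f k ++ d) ++ s2.flatMap f)
      = s1.flatMap f ++ (f k ++ (d ++ s2.flatMap f)) := by simp [List.append_assoc]
  have hR : (s1.flatMap f ++ (f k ++ s2.flatMap f)) ++ d
      = s1.flatMap f ++ (f k ++ (s2.flatMap f ++ d)) := by simp [List.append_assoc]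
  rw [hL, hR]
  exact List.Perm.append_left _ (List.Perm.append_left _ List.perm_append_comm)

theorem bmain (xs : List (Int × String × String × String × Int)) :
    ((PySem.Set.ofList (xs.map (fun p => p.1))).flatMap (fun k => gEmit (grp xs k))).Perm
      (P [] xs) := by
  induction xs using List.reverseRecOn with
  | nil => simp [grp, P, PySem.List.enumerate_nil]
  | append_singleton xs e ih =>
    have hgrp' : ∀ k, grp (xs ++ [e]) k =
        grp xs k ++ (if e.1 == k then [((xs.length : Int), e)] else []) := by
      intro k
      simp only [grp, PySem.List.enumerate_append, PySem.List.enumerate_cons,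
        PySem.List.enumerate_nil, List.filter_append]
      cases h : (e.1 == k) <;> simp [h]
    have hP := P_append_singleton xs e []
    simp only [List.nil_append] at hP
    have hmap : (xs ++ [e]).map (fun p => p.1) = xs.map (fun p => p.1) ++ [e.1] := by simp
    rw [hmap, PySem.Set.ofList_append_singleton, hP]
    by_cases he : e.1 ∈ xs.map (fun p => p.1)
    · rw [PySem.Set.add_of_mem ((PySem.Set.mem_ofList _ _).mpr he)]
      have hfs : (xs.find? (fun q => q.1 == e.1)).isSome := by
        rw [List.find?_isSome]
        obtain ⟨q, hq, hq1⟩ := List.mem_map.mp he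
        exact ⟨q, hq, by simp [hq1]⟩
      obtain ⟨p, hp⟩ := Option.isSome_iff_exists.mp hfs
      have hms := filter_enum_map_snd (fun en => en.1 == e.1) xs 0
      have hhead : (xs.filter (fun en => en.1 == e.1)).head? = some p := by
        rw [List.head?_filter, hp]
      cases hg : grp xs e.1 with
      | nil =>
        exfalso
        rw [grp] at hg
        rw [hg] at hms
        simp only [List.map_nil] at hms
        rw [← hms] at hhead
        simp at hhead
      | cons e0 t =>
        have he0 : e0.2 = p := by
          rw [grp] at hg
          rw [hg] at hms
          simp only [List.map_cons] at hms
          rw [← hms] at hhead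
          simpa using hhead
        rw [hp]
        refine List.Perm.trans
          (perm_flatMap_update _ _ _ e.1 (pairIf p e (xs.length : Int))
            (PySem.Set.nodup_ofList _) ((PySem.Set.mem_ofList _ _).mpr he) ?_ ?_)
          (List.Perm.append_right _ ih)
        · intro k hk hkne
          have : (e.1 == k) = false := by
            by_contra h
            rw [Bool.not_eq_false, beq_iff_eq] at h
            exact hkne h.symm
          rw [hgrp' k, this]
          simp
        · rw [hgrp' e.1, hg]
          simp only [beq_self_eq_true, if_true, List.cons_append, gEmit_cons,
            List.filter_append, List.map_append]
          congr 1
          rw [← he0]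
          simp only [pairIf]
          cases hc : (e.2.2.1 == e0.2.2.2.1) <;> simp [hc]
    · rw [PySem.Set.add_of_not_mem (fun h => he ((PySem.Set.mem_ofList _ _).mp h))]
      have hfind : (xs.find? (fun q => q.1 == e.1)) = none := by
        rw [List.find?_eq_none]
        intro q hq
        simp only [beq_iff_eq]
        intro h
        exact he (List.mem_map.mpr ⟨q, hq, h⟩)
      rw [hfind]
      have hnil : grp xs e.1 = [] := by
        have hms := filter_enum_map_snd (fun en => en.1 == e.1) xs 0
        have : xs.filter (fun en => en.1 == e.1) = [] := by
          rw [List.filter_eq_nil_iff]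
          intro q hq
          simp only [beq_iff_eq]
          intro h
          exact he (List.mem_map.mpr ⟨q, hq, h⟩)
        rw [this] at hms
        exact List.map_eq_nil_iff.mp hms
      rw [List.flatMap_append]
      have e1 : (PySem.Set.ofList (xs.map (fun p => p.1))).flatMap
          (fun k => gEmit (grp (xs ++ [e]) k)) =
          (PySem.Set.ofList (xs.map (fun p => p.1))).flatMap (fun k => gEmit (grp xs k)) := by
        apply List.flatMap_congr
        intro k hk
        have hkne : (e.1 == k) = false := by
          have : k ∈ xs.map (fun p => p.1) := (PySem.Set.mem_ofList _ _).mp hk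
          by_contra h
          rw [Bool.not_eq_false, beq_iff_eq] at h
          exact he (h ▸ this)
        rw [hgrp' k, hkne]
        simp
      have e2 : gEmit (grp (xs ++ [e]) e.1) = [] := by
        rw [hgrp' e.1, hnil]
        simp [gEmit_cons]
      rw [e1]
      simp only [List.flatMap_cons, List.flatMap_nil, e2, List.append_nil]
      simpa using ih

-- ===== VERDICT (by name: the statement is the Claim_ definition above) =====
theorem check_duplicate_spell_ids_spec : Claim_equal_check_duplicate_spell_ids := by
  intro xs _
  unfold Spec_check_duplicate_spell_ids check_duplicate_spell_ids check_duplicate_spell_ids_alt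
  rw [a_go xs [] [] PySem.Dict.empty (by intro sid; simp [PySem.Dict.get?, PySem.Dict.empty])]
  -- name the built dict
  set d : PySem.Dict Int (List (Int × (Int × String × String × String × Int))) :=
    (PySem.List.enumerate xs 0).foldl
      (fun d ie => d.modify ie.2.1 [] (fun v => v ++ [ie])) PySem.Dict.empty with hd
  -- pass 2's fold is a flatMap of gEmit
  have hbody : (fun (acc : List (Int × String))
      (entries : List (Int × (Int × String × String × String × Int))) =>
        match entries with
        | [] => acc
        | (_, ref) :: rest =>
            acc ++ rest.foldl
              (fun (a : List (Int × String)) ie =>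
                if ie.2.2.2.1 == ref.2.2.1 then
                  a ++ [(ie.1, dupMsg ie.2.1 ie.2.2.1 ie.2.2.2.2.1 ie.2.2.2.2.2 ref.2.1 ref.2.2.2.1 ref.2.2.2.2 ie.2.2.2.1)]
                else a) [])
      = fun acc entries => acc ++ gEmit entries := by
    funext acc entries
    cases entries with
    | nil => simp [gEmit]
    | cons e0 rest => obtain ⟨i0, ref⟩ := e0; simp [gEmit]
  rw [hbody]
  dsimp only
  rw [PySem.List.foldl_append_eq_flatMap, List.nil_append]
  -- keys of d
  have hkeymap : (PySem.List.enumerate xs 0).map (fun ie => ie.2.1) = xs.map (fun p => p.1) := by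
    have h2 := PySem.List.map_snd_enumerate xs 0
    calc (PySem.List.enumerate xs 0).map (fun ie => ie.2.1)
        = ((PySem.List.enumerate xs 0).map (fun ie => ie.2)).map (fun p => p.1) := by
          rw [List.map_map]; rfl
      _ = xs.map (fun p => p.1) := by rw [h2]
  have hkeys : d.keys = PySem.Set.ofList (xs.map (fun p => p.1)) := by
    rw [hd, PySem.Dict.keys_foldl_modify_key (PySem.List.enumerate xs 0)
      (fun ie => ie.2.1) [] (fun _ ie => fun v => v ++ [ie]) PySem.Dict.empty]
    rw [PySem.Dict.keys_empty, PySem.Set.update_nil_left, hkeymap]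
  have hnodup : d.keys.Nodup := by rw [hkeys]; exact PySem.Set.nodup_ofList _
  -- content of each group
  have hgetD : ∀ k, d.getD k [] = grp xs k := by
    intro k
    rw [hd, show ((PySem.List.enumerate xs 0).foldl
        (fun d ie => d.modify ie.2.1 [] (fun v => v ++ [ie])) PySem.Dict.empty)
      = (((PySem.List.enumerate xs 0).map (fun ie => (ie.2.1, ie))).foldl
        (fun d p => d.modify p.1 [] (fun v => v ++ [p.2])) PySem.Dict.empty) from by
        rw [List.foldl_map]]
    rw [PySem.Dict.getD_foldl_modify_append]
    have hempty : (PySem.Dict.empty :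
        PySem.Dict Int (List (Int × (Int × String × String × String × Int)))).getD k [] = [] := by
      simp [PySem.Dict.getD, PySem.Dict.get?, PySem.Dict.empty]
    rw [hempty, List.nil_append, List.filter_map, List.map_map]
    simp only [Function.comp_def]
    simp [grp]
  -- values of d
  have hvals : d.values = d.keys.map (fun k => d.getD k []) :=
    values_eq_map_getD' d [] hnodup
  rw [hvals, hkeys, List.flatMap_map]
  have hgrpcong : ∀ k ∈ PySem.Set.ofList (xs.map (fun p => p.1)),
      gEmit (d.getD k []) = gEmit (grp xs k) := fun k _ => by rw [hgetD k]
  rw [List.flatMap_congr hgrpcong]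
  simp only [List.nil_append]
  -- sort restores input order
  have hsorted : PySem.List.sorted
      ((PySem.Set.ofList (xs.map (fun p => p.1))).flatMap (fun k => gEmit (grp xs k)))
      (fun p => p.1) = P [] xs :=
    PySem.List.sorted_eq_of_perm_of_pairwise_lt _ _ _ (bmain xs).symm ((P_fst_bounds xs []).2)
  rw [hsorted, dupGo_eq_P_map]
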